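-- pv_equiv track=rewrite | github.com/ccc96360/Algorithm | Programmers/Level2/문자열_압축.py | solution
-- ===== SOURCE A (Python) =====
-- def solution(s):
--     n = len(s)
--     answer = n
--     for i in range(1, n+1):
--         front = s[:i]
--         cnt = 1
--         idx = i
--         li = []
--         for idx in range(i, n, i):
--             curStr = s[idx:idx+i]
--             if front == curStr:
--                 cnt += 1
--             else:
--                 tmp = (str(cnt) + front) if cnt > 1 else front
--                 li.append(tmp)
--                 cnt = 1
--                 front = curStr
--         li.append((str(cnt) + front) if cnt > 1 else front)
--         res = "".join(li)
--         answer = min(answer, len(res))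
--     return answer
-- ===== SOURCE B (Python) =====
-- def solution(s):
--     # Character-level longest-common-extension DP instead of chunk-string comparisons:
--     # for each size, a backward pass computes ext[p] = LCE of s[p:] and s[p+i:]; adjacent
--     # full chunks are equal iff ext[start] >= i, and the compressed length is summed
--     # arithmetically over maximal adjacency runs -- no chunk substrings are ever built.
--     n = len(s)
--     best = n
--     for i in range(1, n + 1):
--         ext = [0] * (n + 1)
--         for p in range(n - i - 1, -1, -1):
--             ext[p] = ext[p + 1] + 1 if s[p] == s[p + i] else 0
--         f = n // i          # number of full chunks
--         r = n - f * i       # trailing short chunk (always its own run)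
--         total = r
--         j = 0
--         while j < f:
--             t = 1
--             while j + t < f and ext[(j + t - 1) * i] >= i:
--                 t += 1
--             total += i + (len(str(t)) if t > 1 else 0)
--             j += t
--         best = min(best, total)
--     return best
-- ===== Notes on version B (the rewrite author's own statement) =====
-- stated objective: alternative
-- what changed: B never builds or compares chunk substrings: for each size it runs a backward longest-common-extension DP over characters (ext[p] = LCE of s[p:] and s[p+i:]), decides adjacent-chunk equality by ext >= size, and sums the compressed length arithmetically over adjacency runs, whereas A slices chunks, builds the compressed string and measures its length.
import Mathlib
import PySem

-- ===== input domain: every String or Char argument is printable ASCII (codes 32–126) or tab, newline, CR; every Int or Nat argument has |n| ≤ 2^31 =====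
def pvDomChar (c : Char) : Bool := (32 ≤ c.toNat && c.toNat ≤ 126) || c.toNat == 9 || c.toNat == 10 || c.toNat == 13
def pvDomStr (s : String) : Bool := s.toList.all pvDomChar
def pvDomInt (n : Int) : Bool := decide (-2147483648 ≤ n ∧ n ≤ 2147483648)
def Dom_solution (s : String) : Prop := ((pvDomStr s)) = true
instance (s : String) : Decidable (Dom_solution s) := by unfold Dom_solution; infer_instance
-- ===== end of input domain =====

-- B replaces A's chunk slicing and string building by a character-level longest-common-
-- extension DP plus arithmetic run counting; objective: alternative (same asymptotic cost).

-- ===== PORT A =====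
-- inner-loop body of A: state (front, cnt, li), one step per chunk s[idx:idx+i]
def pvBodyA (st : String × Int × List String) (curStr : String) : String × Int × List String :=
  if st.1 == curStr then (st.1, st.2.1 + 1, st.2.2)
  else (curStr, 1, st.2.2 ++ [if st.2.1 > 1 then PySem.Int.toStr st.2.1 ++ st.1 else st.1])

def solution (s : String) : Int :=
  let n : Int := PySem.Str.len s
  (PySem.List.pyRange 1 (n + 1) 1).foldl (fun answer i =>
    let front := PySem.Str.slice s none (some i)
    let st := (PySem.List.pyRange i n i).foldl
      (fun st idx => pvBodyA st (PySem.Str.slice s (some idx) (some (idx + i))))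
      (front, 1, ([] : List String))
    let li := st.2.2 ++ [if st.2.1 > 1 then PySem.Int.toStr st.2.1 ++ st.1 else st.1]
    let res := PySem.Str.join "" li
    min answer (PySem.Str.len res)) n

-- ===== PORT B =====
-- Source B fills ext[] by a backward loop (ext[p] from ext[p+1]); this recursion computes the
-- same values (the array is only memoisation): ext[p] = LCE of s[p:] and s[p+i:]
def pvExtB (cs : List Char) (i : Nat) (p : Nat) : Nat :=
  if h : p + i < cs.length then
    if cs[p]'(by omega) = cs[p + i]'h then pvExtB cs i (p + 1) + 1 else 0
  else 0
termination_by cs.length - p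

-- the inner `while j + t < f and ext[(j+t-1)*i] >= i` loop of Source B (counters as Nat)
def pvRunB (cs : List Char) (i f j t : Nat) : Nat :=
  if h : j + t < f ∧ i ≤ pvExtB cs i ((j + t - 1) * i) then pvRunB cs i f j (t + 1) else t
termination_by f - (j + t)
decreasing_by omega

-- needed by pvScanB's termination proof
theorem pvRunB_ge (cs : List Char) (i f j : Nat) : ∀ t, t ≤ pvRunB cs i f j t := by
  intro t
  induction t using pvRunB.induct cs i f j with
  | case1 t h ih => rw [pvRunB, dif_pos h]; omega
  | case2 t h => rw [pvRunB, dif_neg h]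

-- the outer `while j < f` loop of Source B, accumulating total
def pvScanB (cs : List Char) (i f : Nat) (j : Nat) (total : Int) : Int :=
  if h : j < f then
    let t := pvRunB cs i f j 1
    pvScanB cs i f (j + t)
      (total + (i : Int) + (if 1 < t then PySem.Str.len (PySem.Int.toStr (t : Int)) else 0))
  else total
termination_by f - j
decreasing_by have := pvRunB_ge cs i f j 1; omega

def solution_alt (s : String) : Int :=
  let cs := s.toList
  let n : Int := PySem.Str.len s
  (PySem.List.pyRange 1 (n + 1) 1).foldl (fun best i =>
    let f : Int := PySem.Int.floordiv n i
    let r : Int := n - f * i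
    min best (pvScanB cs i.toNat f.toNat 0 r)) n

-- ===== PRECONDITION & SPEC =====
def Spec_solution (s : String) (out : Int) : Prop := out = solution_alt s
instance (s : String) (out : Int) : Decidable (Spec_solution s out) := by unfold Spec_solution; infer_instance

-- ===== CLAIM (what is proved, stated in full; the proofs are below) =====
def Claim_equal_solution : Prop := ∀ (s : String), Dom_solution s → Spec_solution s (solution s)

-- ===== LEMMAS AND PROOFS =====

-- length contribution of one compressed piece
def pvD (cnt : Int) : Int := if cnt > 1 then PySem.Str.len (PySem.Int.toStr cnt) else 0

-- arithmetic run-length compressed length of a chunk stream, open run (front, cnt)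
def pvG (front : String) (cnt : Int) : List String → Int
  | [] => pvD cnt + PySem.Str.len front
  | c :: cs => if c = front then pvG front (cnt + 1) cs
               else pvD cnt + PySem.Str.len front + pvG c 1 cs

-- pvG of a whole (possibly empty) chunk stream
def pvGL : List String → Int
  | [] => 0
  | h :: t => pvG h 1 t

def pvSumLens (l : List String) : Int := (l.map PySem.Str.len).sum

-- the k-th chunk of s for chunk size i
def pvChunk (s : String) (i : Int) (k : Nat) : String :=
  PySem.Str.slice s (some ((k : Int) * i)) (some ((k : Int) * i + i))

-- the full chunk list (M chunks)
def pvCL (s : String) (i : Int) (M : Nat) : List String := (List.range M).map (pvChunk s i)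

theorem pvJoin_len (l : List String) : PySem.Str.len (PySem.Str.join "" l) = pvSumLens l := by
  induction l with
  | nil => simp [PySem.Str.len_eq, PySem.Str.toList_join, PySem.Chars.join_nil, pvSumLens]
  | cons p rest ih =>
      cases rest with
      | nil =>
          simp [PySem.Str.len_eq, PySem.Str.toList_join, PySem.Chars.join_singleton, pvSumLens]
      | cons q rs =>
          simp only [PySem.Str.len_eq, PySem.Str.toList_join, List.map_cons,
            PySem.Chars.join_cons_cons, pvSumLens, List.map_cons, List.sum_cons] at *
          simp only [List.length_append]
          push_cast
          simp only [String.toList_empty, List.length_nil] at *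
          omega

theorem pvTmp_len (cnt : Int) (front : String) :
    PySem.Str.len (if cnt > 1 then PySem.Int.toStr cnt ++ front else front) =
      pvD cnt + PySem.Str.len front := by
  unfold pvD
  split
  · simp [PySem.Str.len_eq, String.toList_append]
  · simp

-- A's inner loop + final append, measured, equals pvSumLens li + pvG front cnt cs
theorem pvLoopA_spec : ∀ (cs : List String) (front : String) (cnt : Int) (li : List String),
    (let st := cs.foldl pvBodyA (front, cnt, li)
     pvSumLens (st.2.2 ++ [if st.2.1 > 1 then PySem.Int.toStr st.2.1 ++ st.1 else st.1])) =
      pvSumLens li + pvG front cnt cs := by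
  intro cs
  induction cs with
  | nil =>
      intro front cnt li
      simp only [List.foldl_nil, pvG, pvSumLens, List.map_append, List.sum_append,
        List.map_cons, List.map_nil, List.sum_cons, List.sum_nil, pvTmp_len]
      omega
  | cons c cs ih =>
      intro front cnt li
      simp only [List.foldl_cons, pvBodyA, pvG]
      by_cases h : front = c
      · subst h
        simp only [BEq.refl, if_true]
        exact ih front (cnt + 1) li
      · have hb : (front == c) = false := by simp [h]
        have h' : ¬ (c = front) := fun hh => h hh.symm
        simp only [hb, if_neg h', Bool.false_eq_true, if_false]
        rw [ih c 1 (li ++ [if cnt > 1 then PySem.Int.toStr cnt ++ front else front])]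
        simp only [pvSumLens, List.map_append, List.sum_append, List.map_cons, List.map_nil,
          List.sum_cons, List.sum_nil]
        have := pvTmp_len cnt front
        omega

-- pvG splits as the leading run (takeWhile) plus the rest (dropWhile)
theorem pvG_run : ∀ (cs : List String) (front : String) (cnt : Int),
    pvG front cnt cs =
      pvD (cnt + ((cs.takeWhile (· == front)).length : Int)) + PySem.Str.len front +
        pvGL (cs.dropWhile (· == front)) := by
  intro cs
  induction cs with
  | nil => intro front cnt; simp [pvG, pvGL]
  | cons c cs ih =>
      intro front cnt
      simp only [pvG, List.takeWhile, List.dropWhile]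
      by_cases h : c = front
      · subst h
        simp only [BEq.refl, if_true]
        rw [ih c (cnt + 1)]
        simp only [List.length_cons]
        push_cast
        ring_nf
      · have hb : (c == front) = false := by simp [h]
        simp only [hb, if_neg h, List.length_nil, Nat.cast_zero, add_zero, pvGL]

-- dropWhile is the drop of the takeWhile length
theorem pvDropWhile_eq_drop {α : Type} (p : α → Bool) (l : List α) :
    l.dropWhile p = l.drop (l.takeWhile p).length := by
  have h := List.takeWhile_append_dropWhile (p := p) (l := l)
  calc l.dropWhile p
      = (l.takeWhile p ++ l.dropWhile p).drop (l.takeWhile p).length := (List.drop_left).symm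
    _ = l.drop (l.takeWhile p).length := by rw [h]

-- (a-1)*i + i = a*i for a ≥ 1
theorem pvMulShift (a i : Nat) (h : 1 ≤ a) : (a - 1) * i + i = a * i := by
  obtain ⟨b, rfl⟩ : ∃ b, a = b + 1 := ⟨a - 1, by omega⟩
  simp [Nat.add_mul]

-- pvExtB is the longest common extension: L ≤ ext[p] iff the two L-windows agree
theorem pvExt_iff (cs : List Char) (i : Nat) :
    ∀ (L p : Nat), p + i + L ≤ cs.length →
      (L ≤ pvExtB cs i p ↔ (cs.drop p).take L = (cs.drop (p + i)).take L) := by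
  intro L
  induction L with
  | zero => intro p _; simp
  | succ L ihL =>
      intro p hb
      have hpi : p + i < cs.length := by omega
      have hp : p < cs.length := by omega
      rw [pvExtB, dif_pos hpi]
      rw [List.drop_eq_getElem_cons hp, List.drop_eq_getElem_cons hpi]
      rw [List.take_succ_cons, List.take_succ_cons]
      by_cases hc : cs[p] = cs[p + i]
      · rw [if_pos hc]
        have hih := ihL (p + 1) (by omega)
        rw [show p + 1 + i = p + i + 1 by omega] at hih
        constructor
        · intro hle
          rw [hc]
          have := hih.mp (by omega)
          rw [this]
        · intro heq
          have h2 := (List.cons.injEq _ _ _ _).mp heq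
          have := hih.mpr h2.2
          omega
      · rw [if_neg hc]
        constructor
        · intro hle; omega
        · intro heq
          have h2 := (List.cons.injEq _ _ _ _).mp heq
          exact absurd h2.1 hc

-- chunk k of s, as a character list
theorem pvChunk_toList (s : String) (iN k : Nat) :
    (pvChunk s (iN : Int) k).toList = (s.toList.drop (k * iN)).take iN := by
  simp only [pvChunk, PySem.Str.toList_slice, PySem.Chars.slice_eq_listSlice]
  rw [show ((k : Nat) : Int) * ((iN : Nat) : Int) = ((k * iN : Nat) : Int) by push_cast; ring]
  exact PySem.List.slice_natCast_add s.toList (k * iN) iN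

theorem pvString_eq_iff (a b : String) : a = b ↔ a.toList = b.toList := by
  constructor
  · intro h; rw [h]
  · intro h; exact String.toList_injective h

-- a full chunk (k < f) has length iN
theorem pvChunk_len (s : String) (iN k : Nat) (hk : (k + 1) * iN ≤ s.toList.length) :
    (pvChunk s (iN : Int) k).toList.length = iN := by
  rw [pvChunk_toList]
  rw [Nat.succ_mul] at hk
  simp only [List.length_take, List.length_drop]
  omega

-- Str.len through toList
theorem pvStrLen (x : String) : PySem.Str.len x = (x.toList.length : Int) := by
  simp [PySem.Str.len_eq]

-- ===== the B scan computes pvGL of the chunk list =====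

theorem pvRunB_le (cs : List Char) (i f j : Nat) :
    ∀ t, j + t ≤ f → j + pvRunB cs i f j t ≤ f := by
  intro t
  induction t using pvRunB.induct cs i f j with
  | case1 t h ih => intro _; rw [pvRunB, dif_pos h]; exact ih (by omega)
  | case2 t h => intro hle; rw [pvRunB, dif_neg h]; exact hle

-- run-length characterisation of pvRunB via takeWhile on the chunk list
theorem pvRunB_spec (s : String) (iN : Nat) (hi : 1 ≤ iN) (hin : iN ≤ s.toList.length)
    (f M : Nat) (hf : f = s.toList.length / iN) (hfM : f ≤ M) (hMf : M ≤ f + 1)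
    (hMlt : f < M ↔ f * iN < s.toList.length) (j : Nat) (hj : j < f) :
    ∀ t, 1 ≤ t → j + t ≤ f → pvChunk s (iN : Int) (j + t - 1) = pvChunk s (iN : Int) j →
      pvRunB s.toList iN f j t =
        t + (((pvCL s (iN : Int) M).drop (j + t)).takeWhile
              (· == pvChunk s (iN : Int) j)).length := by
  intro t
  induction t using pvRunB.induct s.toList iN f j with
  | case1 t h ih =>
      intro h1 hle hinv
      have hjt : j + t < f := h.1
      have hnn : f * iN ≤ s.toList.length := by
        rw [hf]; exact Nat.div_mul_le_self _ _
      have hms := pvMulShift (j + t) iN (by omega)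
      have hbound : (j + t - 1) * iN + iN + iN ≤ s.toList.length := by
        have h2 : (j + t + 1) * iN ≤ f * iN := Nat.mul_le_mul_right iN (by omega)
        have h3 : (j + t + 1) * iN = (j + t) * iN + iN := by ring
        omega
      have hext := (pvExt_iff s.toList iN iN ((j + t - 1) * iN) hbound).mp h.2
      have hstep : pvChunk s (iN : Int) (j + t - 1) = pvChunk s (iN : Int) (j + t) := by
        rw [pvString_eq_iff, pvChunk_toList, pvChunk_toList]
        rw [show (j + t) * iN = (j + t - 1) * iN + iN by omega]
        exact hext
      have hinv' : pvChunk s (iN : Int) (j + t) = pvChunk s (iN : Int) j := by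
        rw [← hstep]; exact hinv
      rw [pvRunB, dif_pos h]
      rw [ih (by omega) (by omega) (by rw [show j + (t + 1) - 1 = j + t by omega]; exact hinv')]
      rw [show j + (t + 1) = j + t + 1 by omega]
      have hlenCL : (pvCL s (iN : Int) M).length = M := by simp [pvCL]
      have hdrop : (pvCL s (iN : Int) M).drop (j + t) =
          pvChunk s (iN : Int) (j + t) :: (pvCL s (iN : Int) M).drop (j + t + 1) := by
        rw [List.drop_eq_getElem_cons (by omega)]
        congr 1
        simp [pvCL]
      rw [hdrop]
      simp only [List.takeWhile_cons, hinv', BEq.refl, if_true, List.length_cons]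
      omega
  | case2 t h =>
      intro h1 hle hinv
      rw [pvRunB, dif_neg h]
      have hlenCL : (pvCL s (iN : Int) M).length = M := by simp [pvCL]
      have hnn : f * iN ≤ s.toList.length := by
        rw [hf]; exact Nat.div_mul_le_self _ _
      have hz : (((pvCL s (iN : Int) M).drop (j + t)).takeWhile
          (· == pvChunk s (iN : Int) j)).length = 0 := by
        by_cases hjt : j + t < f
        · -- mismatch: ext < iN ⇒ chunk (j+t-1) ≠ chunk (j+t)
          have hms := pvMulShift (j + t) iN (by omega)
          have hbound : (j + t - 1) * iN + iN + iN ≤ s.toList.length := by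
            have h2 : (j + t + 1) * iN ≤ f * iN := Nat.mul_le_mul_right iN (by omega)
            have h3 : (j + t + 1) * iN = (j + t) * iN + iN := by ring
            omega
          have hnext : ¬ iN ≤ pvExtB s.toList iN ((j + t - 1) * iN) := by
            intro hh; exact h ⟨hjt, hh⟩
          have hne : pvChunk s (iN : Int) (j + t - 1) ≠ pvChunk s (iN : Int) (j + t) := by
            intro heq
            apply hnext
            rw [pvExt_iff s.toList iN iN ((j + t - 1) * iN) hbound]
            rw [pvString_eq_iff, pvChunk_toList, pvChunk_toList] at heq
            rw [show (j + t) * iN = (j + t - 1) * iN + iN by omega] at heq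
            exact heq
          have hnej : pvChunk s (iN : Int) (j + t) ≠ pvChunk s (iN : Int) j := by
            intro heq; exact hne (by rw [hinv, heq])
          rw [List.drop_eq_getElem_cons (show j + t < (pvCL s (iN : Int) M).length by omega)]
          have hgj : (pvCL s (iN : Int) M)[j + t]'(by omega) = pvChunk s (iN : Int) (j + t) := by
            simp [pvCL]
          rw [hgj]
          simp only [List.takeWhile_cons, beq_eq_false_iff_ne.mpr hnej, Bool.false_eq_true,
            if_false, List.length_nil]
        · -- j + t = f : the rest is [] or the short tail chunk, which is shorter than iN
          have hjtf : j + t = f := by omega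
          by_cases hMc : f < M
          · have hM1 : M = f + 1 := by omega
            have hflt : f * iN < s.toList.length := hMlt.mp hMc
            rw [List.drop_eq_getElem_cons (show j + t < (pvCL s (iN : Int) M).length by omega)]
            have hgj : (pvCL s (iN : Int) M)[j + t]'(by omega) = pvChunk s (iN : Int) f := by
              simp [pvCL, hjtf]
            have hmod := Nat.div_add_mod s.toList.length iN
            rw [Nat.mul_comm iN (s.toList.length / iN)] at hmod
            have hmlt : s.toList.length % iN < iN := Nat.mod_lt _ (by omega)
            have hlenf : (pvChunk s (iN : Int) f).toList.length < iN := by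
              rw [pvChunk_toList]
              simp only [List.length_take, List.length_drop]
              rw [← hf] at hmod
              exact lt_of_le_of_lt (Nat.min_le_right _ _) (by omega)
            have hlenj : (pvChunk s (iN : Int) j).toList.length = iN := by
              apply pvChunk_len
              have : (j + 1) * iN ≤ f * iN := Nat.mul_le_mul_right iN (by omega)
              omega
            have hne : pvChunk s (iN : Int) f ≠ pvChunk s (iN : Int) j := by
              intro heq
              rw [heq, hlenj] at hlenf
              omega
            rw [hgj]
            simp only [List.takeWhile_cons, beq_eq_false_iff_ne.mpr hne, Bool.false_eq_true,
              if_false, List.length_nil]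
          · rw [List.drop_eq_nil_of_le (by omega)]
            simp
      omega

-- the value of pvGL on the part of the chunk list after the full chunks: the tail remainder
theorem pvTail_GL (s : String) (iN : Nat) (hi : 1 ≤ iN) (hin : iN ≤ s.toList.length)
    (f M : Nat) (hf : f = s.toList.length / iN) (hfM : f ≤ M) (hMf : M ≤ f + 1)
    (hMlt : f < M ↔ f * iN < s.toList.length) :
    pvGL ((pvCL s (iN : Int) M).drop f) =
      (s.toList.length : Int) - (f : Int) * (iN : Int) := by
  have hlenCL : (pvCL s (iN : Int) M).length = M := by simp [pvCL]
  have hnn : f * iN ≤ s.toList.length := by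
    rw [hf]; exact Nat.div_mul_le_self _ _
  by_cases hc : f < M
  · have hM1 : M = f + 1 := by omega
    have hflt : f * iN < s.toList.length := hMlt.mp hc
    rw [List.drop_eq_getElem_cons (show f < (pvCL s (iN : Int) M).length by omega)]
    have hgj : (pvCL s (iN : Int) M)[f]'(by omega) = pvChunk s (iN : Int) f := by
      simp [pvCL]
    rw [hgj]
    rw [List.drop_eq_nil_of_le (by omega)]
    have hmod := Nat.div_add_mod s.toList.length iN
    rw [Nat.mul_comm iN (s.toList.length / iN)] at hmod
    have hmlt : s.toList.length % iN < iN := Nat.mod_lt _ (by omega)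
    rw [← hf] at hmod
    show pvG (pvChunk s (iN : Int) f) 1 [] = _
    simp only [pvG]
    rw [show pvD 1 = 0 by simp [pvD]]
    rw [pvStrLen, pvChunk_toList]
    simp only [List.length_take, List.length_drop]
    rw [Nat.min_eq_right (show s.toList.length - f * iN ≤ iN by omega)]
    rw [Nat.cast_sub hnn]
    push_cast
    ring
  · have hMc : M = f := by omega
    rw [List.drop_eq_nil_of_le (by omega)]
    have hfe : f * iN = s.toList.length := by
      have := hMlt.not.mp (by omega)
      omega
    show (0 : Int) = _
    rw [← hfe]
    push_cast
    ring

theorem pvScanB_spec (s : String) (iN : Nat) (hi : 1 ≤ iN) (hin : iN ≤ s.toList.length)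
    (f M : Nat) (hf : f = s.toList.length / iN) (hfM : f ≤ M) (hMf : M ≤ f + 1)
    (hMlt : f < M ↔ f * iN < s.toList.length) :
    ∀ (fuel j : Nat), f - j ≤ fuel → j ≤ f → ∀ (total : Int),
      pvScanB s.toList iN f j total =
        total - ((s.toList.length : Int) - (f : Int) * (iN : Int)) +
          pvGL ((pvCL s (iN : Int) M).drop j) := by
  intro fuel
  induction fuel with
  | zero =>
      intro j hfuel hj total
      have hjf : j = f := by omega
      subst hjf
      rw [pvScanB, dif_neg (lt_irrefl j)]
      rw [pvTail_GL s iN hi hin j M hf hfM hMf hMlt]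
      ring
  | succ fuel ih =>
      intro j hfuel hj total
      by_cases hjlt : j < f
      · rw [pvScanB, dif_pos hjlt]
        have h1t : 1 ≤ pvRunB s.toList iN f j 1 := pvRunB_ge s.toList iN f j 1
        have hjt : j + pvRunB s.toList iN f j 1 ≤ f := pvRunB_le s.toList iN f j 1 (by omega)
        set t := pvRunB s.toList iN f j 1 with ht
        have hrun := pvRunB_spec s iN hi hin f M hf hfM hMf hMlt j hjlt 1 le_rfl (by omega)
          (by norm_num)
        rw [← ht] at hrun
        rw [ih (j + t) (by omega) (by omega) _]
        -- split pvGL (drop j) into this run plus pvGL (drop (j+t))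
        have hlenCL : (pvCL s (iN : Int) M).length = M := by simp [pvCL]
        have hgj : (pvCL s (iN : Int) M)[j]'(by omega) = pvChunk s (iN : Int) j := by
          simp [pvCL]
        have hdropj : (pvCL s (iN : Int) M).drop j =
            pvChunk s (iN : Int) j :: (pvCL s (iN : Int) M).drop (j + 1) := by
          rw [List.drop_eq_getElem_cons (by omega)]
          rw [hgj]
        have hsplit : pvGL ((pvCL s (iN : Int) M).drop j) =
            pvD (t : Int) + (iN : Int) + pvGL ((pvCL s (iN : Int) M).drop (j + t)) := by
          rw [hdropj]
          show pvG (pvChunk s (iN : Int) j) 1 _ = _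
          rw [pvG_run]
          have hdw := pvDropWhile_eq_drop (· == pvChunk s (iN : Int) j)
            ((pvCL s (iN : Int) M).drop (j + 1))
          rw [hdw, List.drop_drop]
          rw [show j + 1 + (((pvCL s (iN : Int) M).drop (j + 1)).takeWhile
                (· == pvChunk s (iN : Int) j)).length = j + t by omega]
          have hlenfull : PySem.Str.len (pvChunk s (iN : Int) j) = (iN : Int) := by
            rw [pvStrLen]
            rw [pvChunk_len s iN j
              (by
                have h2 : (j + 1) * iN ≤ f * iN := Nat.mul_le_mul_right iN (by omega)
                have hnn : f * iN ≤ s.toList.length := by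
                  rw [hf]; exact Nat.div_mul_le_self _ _
                omega)]
          rw [hlenfull]
          have hcast : (1 : Int) + ((((pvCL s (iN : Int) M).drop (j + 1)).takeWhile
              (· == pvChunk s (iN : Int) j)).length : Int) = (t : Int) := by
            have := hrun
            omega
          rw [hcast]
        rw [hsplit]
        have hd : (if 1 < t then PySem.Str.len (PySem.Int.toStr (t : Int)) else 0) =
            pvD (t : Int) := by
          unfold pvD
          by_cases hh : 1 < t
          · rw [if_pos hh, if_pos (by exact_mod_cast hh)]
          · rw [if_neg hh, if_neg (by omega)]
        rw [hd]
        ring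
      · have hjf : j = f := by omega
        subst hjf
        rw [pvScanB, dif_neg (lt_irrefl j)]
        rw [pvTail_GL s iN hi hin j M hf hfM hMf hMlt]
        ring

-- ===== per-size equality and glue =====

-- the front chunk is chunk 0
theorem pvFront (s : String) (iN : Nat) :
    PySem.Str.slice s none (some (iN : Int)) = pvChunk s (iN : Int) 0 := by
  rw [pvString_eq_iff, pvChunk_toList]
  simp [PySem.Str.toList_slice, PySem.Chars.slice_eq_listSlice, PySem.List.slice_to_natCast]

theorem pvSize_eq (s : String) (iN : Nat) (hi : 1 ≤ iN) (hin : iN ≤ s.toList.length) :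
    pvScanB s.toList iN (PySem.Int.floordiv (PySem.Str.len s) (iN : Int)).toNat 0
        (PySem.Str.len s - PySem.Int.floordiv (PySem.Str.len s) (iN : Int) * (iN : Int)) =
      pvG (PySem.Str.slice s none (some (iN : Int))) 1
        ((PySem.List.pyRange (iN : Int) (PySem.Str.len s) (iN : Int)).map
          (fun idx => PySem.Str.slice s (some idx) (some (idx + (iN : Int))))) := by
  have hlen : PySem.Str.len s = (s.toList.length : Int) := pvStrLen s
  rw [hlen]
  rw [PySem.Int.floordiv_natCast s.toList.length iN, Int.toNat_natCast]
  set nN := s.toList.length with hnN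
  set f := nN / iN with hff
  set M := (nN - 1) / iN + 1 with hMM
  have hnn : f * iN ≤ nN := by rw [hff]; exact Nat.div_mul_le_self _ _
  have hfM : f ≤ M := by
    have h1 : nN ≤ (nN - 1) + iN := by omega
    have h2 : nN / iN ≤ ((nN - 1) + iN) / iN := Nat.div_le_div_right h1
    rw [Nat.add_div_right _ (by omega)] at h2
    omega
  have hMf : M ≤ f + 1 := by
    have h2 : (nN - 1) / iN ≤ nN / iN := Nat.div_le_div_right (by omega)
    omega
  have hf1 : 1 ≤ f := by
    rw [hff]
    exact (Nat.one_le_div_iff (by omega)).mpr hin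
  have hMlt : f < M ↔ f * iN < nN := by
    constructor
    · intro hlt
      by_contra hcon
      have hfe : f * iN = nN := by omega
      have : (nN - 1) / iN = f - 1 := by
        apply Nat.div_eq_of_lt_le
        · have : (f - 1) * iN + iN = f * iN := pvMulShift f iN hf1
          omega
        · have : (f - 1 + 1) * iN = f * iN := by congr 1; omega
          omega
      omega
    · intro hlt
      have h1 : f * iN ≤ nN - 1 := by omega
      have h2 : (f * iN) / iN ≤ (nN - 1) / iN := Nat.div_le_div_right h1
      rw [Nat.mul_div_cancel f (by omega : 0 < iN)] at h2
      omega
  -- left side: the B scan over full chunks plus the remainder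
  have hL := pvScanB_spec s iN hi hin f M rfl hfM hMf hMlt f 0 (by omega) (by omega)
    ((nN : Int) - (f : Int) * (iN : Int))
  rw [List.drop_zero] at hL
  rw [hL]
  -- right side: the mapped pyRange is the chunk list without its head
  have hstep : (0 : Int) < (iN : Int) := by exact_mod_cast (by omega : 0 < iN)
  rw [PySem.List.pyRange_of_pos _ _ hstep]
  have hcount : (if (iN : Int) < (nN : Int) then
      (((nN : Int) - (iN : Int) + (iN : Int) - 1) / (iN : Int)).toNat else 0) = M - 1 := by
    by_cases hlt : iN < nN
    · rw [if_pos (by exact_mod_cast hlt)]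
      rw [show ((nN : Int) - (iN : Int) + (iN : Int) - 1) = ((nN - 1 : Nat) : Int) by omega]
      rw [← PySem.Int.floordiv_eq_ediv_of_pos hstep]
      rw [PySem.Int.floordiv_natCast, Int.toNat_natCast]
      omega
    · rw [if_neg (by exact_mod_cast hlt)]
      have hie : iN = nN := by omega
      have : (nN - 1) / iN = 0 := Nat.div_eq_of_lt (by omega)
      omega
  rw [hcount]
  have hmap : (List.range (M - 1)).map
      ((fun idx => PySem.Str.slice s (some idx) (some (idx + (iN : Int)))) ∘
        (fun k : Nat => (iN : Int) + (iN : Int) * (k : Int))) =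
      (List.range (M - 1)).map (fun k => pvChunk s (iN : Int) (k + 1)) := by
    apply List.map_congr_left
    intro k _
    simp only [Function.comp]
    unfold pvChunk
    rw [show ((iN : Int) + (iN : Int) * (k : Int)) = ((k + 1 : Nat) : Int) * (iN : Int) by
      push_cast; ring]
  rw [List.map_map, hmap]
  rw [pvFront]
  -- assemble pvGL of the full chunk list
  have hM1 : M = (M - 1) + 1 := by omega
  have hCL : pvCL s (iN : Int) M =
      pvChunk s (iN : Int) 0 :: (List.range (M - 1)).map (fun k => pvChunk s (iN : Int) (k + 1)) := by
    rw [pvCL, hM1, List.range_succ_eq_map]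
    simp [List.map_map, Function.comp]
  rw [hCL]
  show ((nN : Int) - (f : Int) * (iN : Int)) - ((nN : Int) - (f : Int) * (iN : Int)) +
      pvG (pvChunk s (iN : Int) 0) 1 _ = _
  ring

theorem solution_eq_alt (s : String) : solution s = solution_alt s := by
  unfold solution solution_alt
  apply PySem.List.foldl_congr_mem
  intro acc i hi
  dsimp only
  have hi' := PySem.List.mem_pyRange_one.1 hi
  have h1 : (1 : Int) ≤ i := hi'.1
  have h2 : i < PySem.Str.len s + 1 := hi'.2
  have hlen : PySem.Str.len s = (s.toList.length : Int) := by
    simp [PySem.Str.len_eq]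
  have hiN : i = ((i.toNat : Nat) : Int) := by omega
  -- A's side: fold over mapped chunks, then pvLoopA_spec
  have hfm := List.foldl_map
    (f := fun idx => PySem.Str.slice s (some idx) (some (idx + i)))
    (g := pvBodyA) (l := PySem.List.pyRange i (PySem.Str.len s) i)
    (init := (PySem.Str.slice s none (some i), 1, ([] : List String)))
  rw [← hfm]
  rw [pvJoin_len]
  rw [pvLoopA_spec]
  rw [show pvSumLens [] = 0 by simp [pvSumLens], zero_add]
  rw [hiN, Int.toNat_natCast]
  rw [pvSize_eq s i.toNat (by omega) (by rw [hlen] at h2; omega)]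

-- ===== VERDICT (by name: the statement is the Claim_ definition above) =====
theorem solution_spec : Claim_equal_solution := by
  intro s _
  unfold Spec_solution
  exact solution_eq_alt s
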